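-- pv_equiv track=rewrite | github.com/chirag1992m/heuristicProblemSolvingFall17 | week8-compatibility/bot/game_client.py | is_bigger
-- ===== SOURCE A (Python) =====
-- def is_bigger(config1, config2):
--     bigger = False
--     for x1, x2 in zip(config1, config2):
--         if x1 < x2:
--             return False
--         if x1 > x2:
--             bigger = True
--     return bigger
-- ===== SOURCE B (Python) =====
-- def is_bigger(config1, config2):
--     pairs = list(zip(config1, config2))
--     if any(x1 < x2 for x1, x2 in pairs):
--         return False
--     return any(x1 > x2 for x1, x2 in pairs)
-- ===== Notes on version B (the rewrite author's own statement) =====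
-- stated objective: idiomatic
-- what changed: Replaced the fused early-exit loop with a mutable flag by two independent existential scans (any) over the zipped pairs materialized once.
import Mathlib
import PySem

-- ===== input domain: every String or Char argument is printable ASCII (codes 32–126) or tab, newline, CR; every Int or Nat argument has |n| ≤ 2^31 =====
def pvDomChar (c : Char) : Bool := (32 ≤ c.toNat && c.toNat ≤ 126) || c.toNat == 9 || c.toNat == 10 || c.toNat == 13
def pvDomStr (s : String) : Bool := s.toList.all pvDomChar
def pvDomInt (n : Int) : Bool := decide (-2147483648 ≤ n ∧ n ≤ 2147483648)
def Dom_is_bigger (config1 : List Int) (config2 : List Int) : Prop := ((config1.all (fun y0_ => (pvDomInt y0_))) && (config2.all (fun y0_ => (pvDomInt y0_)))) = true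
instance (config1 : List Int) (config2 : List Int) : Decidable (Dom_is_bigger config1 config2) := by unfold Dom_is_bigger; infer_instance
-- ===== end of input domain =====

-- B replaces A's fused early-exit loop with a mutable flag by two independent
-- existential scans over the zipped pairs (idiomatic; same cost).

-- ===== PORT A =====
-- A's loop over zip(config1, config2) with the 'bigger' flag and early return False.
def is_bigger_loop : List (Int × Int) → Bool → Bool
  | [], bigger => bigger
  | (x1, x2) :: rest, bigger =>
      if x1 < x2 then false
      else is_bigger_loop rest (if x1 > x2 then true else bigger)

def is_bigger (config1 : List Int) (config2 : List Int) : Bool :=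
  is_bigger_loop (config1.zip config2) false

-- ===== PORT B =====
def is_bigger_alt (config1 : List Int) (config2 : List Int) : Bool :=
  let pairs := config1.zip config2
  if pairs.any (fun p => p.1 < p.2) then false
  else pairs.any (fun p => p.1 > p.2)

-- ===== PRECONDITION & SPEC =====
def Spec_is_bigger (config1 : List Int) (config2 : List Int) (out : Bool) : Prop := out = is_bigger_alt config1 config2
instance (config1 : List Int) (config2 : List Int) (out : Bool) : Decidable (Spec_is_bigger config1 config2 out) := by unfold Spec_is_bigger; infer_instance

-- ===== CLAIM (what is proved, stated in full; the proofs are below) =====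
def Claim_equal_is_bigger : Prop := ∀ (config1 : List Int) (config2 : List Int), Dom_is_bigger config1 config2 → Spec_is_bigger config1 config2 (is_bigger config1 config2)

-- ===== LEMMAS AND PROOFS =====
theorem is_bigger_loop_eq (ps : List (Int × Int)) (b : Bool) :
    is_bigger_loop ps b =
      (if ps.any (fun p => p.1 < p.2) then false
       else (b || ps.any (fun p => p.1 > p.2))) := by
  induction ps generalizing b with
  | nil => simp [is_bigger_loop]
  | cons hd tl ih =>
      obtain ⟨x1, x2⟩ := hd
      simp only [is_bigger_loop, List.any_cons]
      by_cases h1 : x1 < x2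
      · simp [h1]
      · rw [ih]
        by_cases h2 : x1 > x2 <;> simp [h1, h2]

-- ===== VERDICT (by name: the statement is the Claim_ definition above) =====
theorem is_bigger_spec : Claim_equal_is_bigger := by
  intro c1 c2 _
  unfold Spec_is_bigger is_bigger is_bigger_alt
  rw [is_bigger_loop_eq]
  simp
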